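-- pv_equiv track=rewrite | github.com/eronekogin/leetcode | 2024/apply_operations_to_an_array.py | apply_operations
-- ===== SOURCE A (Python) =====
-- def apply_operations(nums: list[int]) -> list[int]:
--     """
--     apply operations
--     """
--     for i in range(len(nums) - 1):
--         if nums[i] == nums[i + 1]:
--             nums[i] <<= 1
--             nums[i + 1] = 0
--
--     rslt: list[int] = []
--     zeros = 0
--     for x in nums:
--         if x == 0:
--             zeros += 1
--         else:
--             rslt.append(x)
--
--     return rslt + [0] * zeros
-- ===== SOURCE B (Python) =====
-- def apply_operations(nums: list[int]) -> list[int]: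
--     """
--     apply operations
--     """
--     if not nums:
--         return []
--     front: list[int] = []
--     back: list[int] = []
--     cur = nums[0]
--     for y in nums[1:]:
--         if cur == y:
--             cur, y = cur * 2, 0
--         (front if cur != 0 else back).append(cur)
--         cur = y
--     (front if cur != 0 else back).append(cur)
--     return front + back
-- ===== Notes on version B (the rewrite author's own statement) =====
-- stated objective: alternative
-- what changed: B replaces A's two staged passes (an index-based in-place merge loop over nums followed by a count-zeros-and-rebuild pass) by one single fused left-to-right pass carrying the current element and appending into two bucket lists (non-zeros / zeros), concatenated at the end; B does not mutate nums.
import Mathlib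
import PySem

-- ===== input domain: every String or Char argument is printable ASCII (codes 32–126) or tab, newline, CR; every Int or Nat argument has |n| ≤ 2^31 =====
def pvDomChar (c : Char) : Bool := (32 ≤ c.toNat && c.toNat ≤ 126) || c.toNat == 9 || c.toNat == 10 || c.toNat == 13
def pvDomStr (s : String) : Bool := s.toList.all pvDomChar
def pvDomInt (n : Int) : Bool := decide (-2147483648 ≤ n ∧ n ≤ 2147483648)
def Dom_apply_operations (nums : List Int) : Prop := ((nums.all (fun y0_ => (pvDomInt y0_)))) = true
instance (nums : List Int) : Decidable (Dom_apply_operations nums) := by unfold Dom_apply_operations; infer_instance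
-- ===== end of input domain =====

-- B fuses A's two staged passes (in-place merge loop, then count-and-rebuild) into one
-- single pass with a carried element and two bucket lists; A mutates the caller's list,
-- B does not — the equivalence proved here is about the RETURN value only.

-- ===== PORT A =====
def apply_operations (nums : List Int) : List Int :=
  let ns := (PySem.List.pyRange 0 (PySem.List.len nums - 1) 1).foldl
    (fun (acc : List Int) (i : Int) =>
      if PySem.List.pyGetD acc i 0 = PySem.List.pyGetD acc (i + 1) 0 then
        PySem.List.pySetD (PySem.List.pySetD acc i (PySem.List.pyGetD acc i 0 <<< (1 : Nat))) (i + 1) 0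
      else acc) nums
  let p := ns.foldl
    (fun (st : List Int × Int) x =>
      if x = 0 then (st.1, st.2 + 1) else (st.1 ++ [x], st.2)) ([], 0)
  p.1 ++ List.replicate p.2.toNat 0

-- ===== PORT B =====
def apply_operations_alt (nums : List Int) : List Int :=
  match nums with
  | [] => []
  | n0 :: rest =>
    let st := rest.foldl
      (fun (st : List Int × List Int × Int) y =>
        let cy := if st.2.2 = y then (st.2.2 * 2, (0 : Int)) else (st.2.2, y)
        if cy.1 ≠ 0 then (st.1 ++ [cy.1], st.2.1, cy.2) else (st.1, st.2.1 ++ [cy.1], cy.2))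
      ([], [], n0)
    if st.2.2 ≠ 0 then (st.1 ++ [st.2.2]) ++ st.2.1 else st.1 ++ (st.2.1 ++ [st.2.2])

-- ===== PRECONDITION & SPEC =====
def Spec_apply_operations (nums : List Int) (out : List Int) : Prop := out = apply_operations_alt nums
instance (nums : List Int) (out : List Int) : Decidable (Spec_apply_operations nums out) := by unfold Spec_apply_operations; infer_instance

-- ===== CLAIM (what is proved, stated in full; the proofs are below) =====
def Claim_equal_apply_operations : Prop := ∀ (nums : List Int), Dom_apply_operations nums → Spec_apply_operations nums (apply_operations nums)

-- ===== LEMMAS AND PROOFS =====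

-- recursive characterisation of A's first (merge) loop: carry the current element
def pvMergeRec : Int → List Int → List Int
  | x, [] => [x]
  | x, y :: rest => if x = y then (x * 2) :: pvMergeRec 0 rest else x :: pvMergeRec y rest

theorem pv_set_at (P : List Int) (a : Int) (l : List Int) (v : Int) :
    (P ++ a :: l).set P.length v = P ++ v :: l := by
  induction P with
  | nil => simp
  | cons p P ih => simp [ih]

theorem pv_getD_at (P : List Int) (a : Int) (l : List Int) :
    (P ++ a :: l).getD P.length 0 = a := by
  simp [List.getD]

theorem pv_getD_at1 (P : List Int) (a b : Int) (l : List Int) :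
    (P ++ a :: b :: l).getD (P.length + 1) 0 = b := by
  have := pv_getD_at (P ++ [a]) b l
  simpa using this

-- A's merge loop over the remaining indices equals the carry recursion
theorem pvA_loop (rest : List Int) : ∀ (P : List Int) (cur : Int),
    (PySem.List.pyRange (P.length : Int)
        (PySem.List.len (P ++ cur :: rest) - 1) 1).foldl
      (fun (acc : List Int) (i : Int) =>
        if PySem.List.pyGetD acc i 0 = PySem.List.pyGetD acc (i + 1) 0 then
          PySem.List.pySetD (PySem.List.pySetD acc i (PySem.List.pyGetD acc i 0 <<< (1 : Nat))) (i + 1) 0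
        else acc) (P ++ cur :: rest)
    = P ++ pvMergeRec cur rest := by
  induction rest with
  | nil =>
    intro P cur
    rw [PySem.List.pyRange_one_eq_nil (by simp [PySem.List.len])]
    simp [pvMergeRec]
  | cons y rest ih =>
    intro P cur
    rw [PySem.List.pyRange_one_cons (by simp [PySem.List.len]; omega)]
    rw [List.foldl_cons]
    have hg0 : PySem.List.pyGetD (P ++ cur :: y :: rest) (P.length : Int) 0 = cur := by
      rw [PySem.List.pyGetD_natCast]; exact pv_getD_at P cur (y :: rest)
    have hg1 : PySem.List.pyGetD (P ++ cur :: y :: rest) ((P.length : Int) + 1) 0 = y := by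
      have : ((P.length : Int) + 1) = ((P.length + 1 : Nat) : Int) := by push_cast; ring
      rw [this, PySem.List.pyGetD_natCast]; exact pv_getD_at1 P cur y rest
    rw [hg0, hg1]
    by_cases h : cur = y
    · simp only [if_pos h]
      have hc1 : ((P.length : Int) + 1) = ((P.length + 1 : Nat) : Int) := by push_cast; ring
      rw [PySem.List.pySetD_natCast, pv_set_at P cur (y :: rest) (cur <<< (1 : Nat)), hc1,
        PySem.List.pySetD_natCast]
      have hs2 : (P ++ cur <<< (1 : Nat) :: y :: rest).set (P.length + 1) 0
          = P ++ cur <<< (1 : Nat) :: 0 :: rest := by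
        have := pv_set_at (P ++ [cur <<< (1 : Nat)]) y rest 0
        simpa using this
      rw [hs2]
      have hre : P ++ cur <<< (1 : Nat) :: 0 :: rest
          = (P ++ [cur <<< (1 : Nat)]) ++ 0 :: rest := by simp
      have hlen2 : PySem.List.len (P ++ cur :: y :: rest)
          = PySem.List.len ((P ++ [cur <<< (1 : Nat)]) ++ 0 :: rest) := by
        simp [PySem.List.len]
      have hlen : ((P.length + 1 : Nat) : Int) = (((P ++ [cur <<< (1 : Nat)]).length : Nat) : Int) := by
        simp
      rw [hre, hlen2, hlen, ih (P ++ [cur <<< (1 : Nat)]) 0]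
      have hsh : ∀ z : Int, z <<< (1 : Nat) = z * 2 := by
        intro z; rw [Int.shiftLeft_eq]; norm_num
      simp [pvMergeRec, h, hsh]
    · simp only [if_neg h]
      have hre : P ++ cur :: y :: rest = (P ++ [cur]) ++ y :: rest := by simp
      have hlen : (P.length : Int) + 1 = (((P ++ [cur]).length : Nat) : Int) := by simp
      rw [hre, hlen, ih (P ++ [cur]) y]
      simp [pvMergeRec, h]

-- A's second loop: accumulates the non-zeros (in order) and the number of zeros.
theorem pv_countLoop (ys : List Int) (r : List Int) (z : Int) :
    ys.foldl
      (fun (st : List Int × Int) x =>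
        if x = 0 then (st.1, st.2 + 1) else (st.1 ++ [x], st.2)) (r, z)
    = (r ++ ys.filter (fun x => !(x == 0)), z + (ys.count 0 : Int)) := by
  induction ys generalizing r z with
  | nil => simp
  | cons x ys ih =>
    by_cases hx : x = 0
    · subst hx
      simp [List.foldl_cons, ih]
      ring
    · simp [List.foldl_cons, hx, ih]

theorem pv_filter_zero (m : List Int) :
    m.filter (fun x => x == 0) = List.replicate (m.count 0) 0 := by
  induction m with
  | nil => simp
  | cons x m ih =>
    by_cases hx : x = 0
    · subst hx; simp [List.replicate_succ, ih]
    · simp [hx, ih]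

-- B's step function, named for the proofs (definitionally the lambda in the port)
def pvStepB (st : List Int × List Int × Int) (y : Int) : List Int × List Int × Int :=
  let cy := if st.2.2 = y then (st.2.2 * 2, (0 : Int)) else (st.2.2, y)
  if cy.1 ≠ 0 then (st.1 ++ [cy.1], st.2.1, cy.2) else (st.1, st.2.1 ++ [cy.1], cy.2)

-- B's fused pass, finalised, is "front ++ non-zeros of the merge ++ back ++ zeros of the merge"
theorem pvB_loop (rest : List Int) : ∀ (cur : Int) (front back : List Int),
    (let st := rest.foldl pvStepB (front, back, cur)
     if st.2.2 ≠ 0 then (st.1 ++ [st.2.2]) ++ st.2.1 else st.1 ++ (st.2.1 ++ [st.2.2]))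
    = (front ++ (pvMergeRec cur rest).filter (fun x => !(x == 0)))
      ++ (back ++ (pvMergeRec cur rest).filter (fun x => x == 0)) := by
  induction rest with
  | nil =>
    intro cur front back
    by_cases hc : cur = 0
    · subst hc; simp [pvMergeRec]
    · simp [pvMergeRec, hc]
  | cons y rest ih =>
    intro cur front back
    simp only [List.foldl_cons]
    by_cases h : cur = y
    · subst h
      by_cases hc : cur = 0
      · subst hc
        have hstep : pvStepB (front, back, (0 : Int)) 0 = (front, back ++ [0], 0) := by
          simp [pvStepB]
        rw [hstep, ih 0 front (back ++ [0])]
        simp [pvMergeRec]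
      · have hc2 : ¬ (cur * 2 = 0) := by omega
        have hstep : pvStepB (front, back, cur) cur = (front ++ [cur * 2], back, 0) := by
          simp [pvStepB, hc2]
        rw [hstep, ih 0 (front ++ [cur * 2]) back]
        simp [pvMergeRec, hc2]
    · by_cases hc : cur = 0
      · subst hc
        have hstep : pvStepB (front, back, (0 : Int)) y = (front, back ++ [0], y) := by
          simp [pvStepB, h]
        rw [hstep, ih y front (back ++ [0])]
        simp [pvMergeRec, h]
      · have hstep : pvStepB (front, back, cur) y = (front ++ [cur], back, y) := by
          simp [pvStepB, h, hc]
        rw [hstep, ih y (front ++ [cur]) back]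
        simp [pvMergeRec, h, hc]

-- ===== VERDICT (by name: the statement is the Claim_ definition above) =====
theorem apply_operations_spec : Claim_equal_apply_operations := by
  intro nums _
  show apply_operations nums = apply_operations_alt nums
  cases nums with
  | nil => decide
  | cons n0 rest =>
    unfold apply_operations apply_operations_alt
    have hA := pvA_loop rest [] n0
    simp only [List.nil_append, List.length_nil, Nat.cast_zero] at hA
    simp only [hA]
    have hlam : (fun (st : List Int × List Int × Int) y =>
        let cy := if st.2.2 = y then (st.2.2 * 2, (0 : Int)) else (st.2.2, y)
        if cy.1 ≠ 0 then (st.1 ++ [cy.1], st.2.1, cy.2) else (st.1, st.2.1 ++ [cy.1], cy.2))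
        = pvStepB := rfl
    rw [hlam]
    have hB := pvB_loop rest n0 [] []
    simp only [List.nil_append] at hB
    simp only [hB]
    rw [pv_countLoop (pvMergeRec n0 rest) [] 0]
    simp [pv_filter_zero]
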